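-- pv_equiv track=rewrite | github.com/GregBaugues/tokenbowl-mcp | lib/enrichment.py | organize_roster_by_position
-- ===== SOURCE A (Python) =====
-- from typing import Any, Dict, List, Set
--
-- def organize_roster_by_position(
--     players: List[Dict[str, Any]],
--     starters_ids: List[str],
--     taxi_ids: List[str],
--     reserve_ids: List[str],
-- ) -> Dict[str, List[Dict[str, Any]]]:
--     """Organize players into roster categories (starters, bench, taxi, reserve).
--
--     Args:
--         players: List of enriched player dictionaries (must have player_id)
--         starters_ids: List of player IDs in starting lineup
--         taxi_ids: List of player IDs on taxi squad
--         reserve_ids: List of player IDs on reserve/IR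
--
--     Returns:
--         Dict with keys: starters, bench, taxi, reserve (each a list of players)
--     """
--     categorized: Dict[str, List[Dict[str, Any]]] = {
--         "starters": [],
--         "bench": [],
--         "taxi": [],
--         "reserve": [],
--     }
--
--     for player in players:
--         player_id = player.get("player_id")
--         if not player_id:
--             continue
--
--         # Categorize by roster position
--         if player_id in reserve_ids:
--             categorized["reserve"].append(player)
--         elif player_id in taxi_ids:
--             categorized["taxi"].append(player)
--         elif player_id in starters_ids:
--             categorized["starters"].append(player)
--         else:
--             categorized["bench"].append(player)
--
--     return categorized
-- ===== SOURCE B (Python) =====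
-- def organize_roster_by_position(players, starters_ids, taxi_ids, reserve_ids):
--     # Staged passes: first carve the three id lists into DISJOINT sets
--     # (set difference encodes the reserve > taxi > starters priority),
--     # then build each category list with its own filter pass over the
--     # valid players; bench is everything not in any of the three sets.
--     reserve = set(reserve_ids)
--     taxi = set(taxi_ids) - reserve
--     starters = set(starters_ids) - reserve - taxi
--     known = starters | taxi | reserve
--
--     valid = [p for p in players if p.get("player_id")]
--     return {
--         "starters": [p for p in valid if p.get("player_id") in starters],
--         "bench": [p for p in valid if p.get("player_id") not in known],
--         "taxi": [p for p in valid if p.get("player_id") in taxi],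
--         "reserve": [p for p in valid if p.get("player_id") in reserve],
--     }
-- ===== Notes on version B (the rewrite author's own statement) =====
-- stated objective: alternative
-- what changed: Replaces A's single accumulator pass with a per-player elif chain by staged passes: three disjoint id sets built once via set difference (encoding the reserve>taxi>starters priority), then four independent filter passes over the valid players, one per category.
import Mathlib
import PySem

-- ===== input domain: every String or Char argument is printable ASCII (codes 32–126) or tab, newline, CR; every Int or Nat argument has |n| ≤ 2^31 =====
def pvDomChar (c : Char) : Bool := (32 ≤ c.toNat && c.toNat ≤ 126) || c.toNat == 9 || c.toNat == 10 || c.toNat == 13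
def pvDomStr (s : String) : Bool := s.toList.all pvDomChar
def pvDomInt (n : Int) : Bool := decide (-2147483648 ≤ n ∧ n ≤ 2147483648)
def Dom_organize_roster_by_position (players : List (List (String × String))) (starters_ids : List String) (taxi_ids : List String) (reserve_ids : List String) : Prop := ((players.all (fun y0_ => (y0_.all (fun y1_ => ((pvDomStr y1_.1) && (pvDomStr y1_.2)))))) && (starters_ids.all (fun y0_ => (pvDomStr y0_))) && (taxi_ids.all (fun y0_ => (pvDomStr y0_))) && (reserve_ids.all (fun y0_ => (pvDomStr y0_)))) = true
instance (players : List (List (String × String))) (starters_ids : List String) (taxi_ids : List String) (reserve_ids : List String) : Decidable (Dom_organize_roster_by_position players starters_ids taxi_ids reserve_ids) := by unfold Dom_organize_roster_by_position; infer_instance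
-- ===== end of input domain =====

-- B replaces A's single dispatching pass (per-player elif chain) by staged passes:
-- three disjoint id sets built by set difference encode the priority, then four
-- independent filter passes over the valid players; objective: alternative decomposition.


-- ===== PORT A =====
-- the four fixed-key lists of `categorized` are carried as a 4-tuple (starters, bench, taxi, reserve)
def pvAStep (starters_ids taxi_ids reserve_ids : List String)
    (st : List (List (String × String)) × List (List (String × String)) × List (List (String × String)) × List (List (String × String)))
    (player : List (String × String)) :
    List (List (String × String)) × List (List (String × String)) × List (List (String × String)) × List (List (String × String)) :=
  let (s, b, t, r) := st
  match (PySem.Dict.mk player).get? "player_id" with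
  | none => (s, b, t, r)                    -- `if not player_id: continue` (None)
  | some pid =>
    if pid = "" then (s, b, t, r)           -- `if not player_id: continue` (empty string)
    else if pid ∈ reserve_ids then (s, b, t, r ++ [player])
    else if pid ∈ taxi_ids then (s, b, t ++ [player], r)
    else if pid ∈ starters_ids then (s ++ [player], b, t, r)
    else (s, b ++ [player], t, r)

def organize_roster_by_position (players : List (List (String × String))) (starters_ids : List String) (taxi_ids : List String) (reserve_ids : List String) : List (String × List (List (String × String))) :=
  let (s, b, t, r) := players.foldl (pvAStep starters_ids taxi_ids reserve_ids) ([], [], [], [])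
  [("starters", s), ("bench", b), ("taxi", t), ("reserve", r)]

-- ===== PORT B =====
-- player.get("player_id") as a truthy value: none for a missing key and for ""
def pvPid? (p : List (String × String)) : Option String :=
  match (PySem.Dict.mk p).get? "player_id" with
  | none => none
  | some pid => if pid = "" then none else some pid

-- `p.get("player_id") in s` (membership of a possibly-absent value in a set)
def pvContains? (s : PySem.Set String) (o : Option String) : Bool :=
  match o with
  | none => false
  | some pid => PySem.Set.contains s pid

def organize_roster_by_position_alt (players : List (List (String × String))) (starters_ids : List String) (taxi_ids : List String) (reserve_ids : List String) : List (String × List (List (String × String))) :=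
  let reserveS := PySem.Set.ofList reserve_ids
  let taxiS := PySem.Set.diff (PySem.Set.ofList taxi_ids) reserveS
  let startersS := PySem.Set.diff (PySem.Set.diff (PySem.Set.ofList starters_ids) reserveS) taxiS
  let knownS := PySem.Set.union (PySem.Set.union startersS taxiS) reserveS
  let valid := players.filter (fun p => (pvPid? p).isSome)
  [("starters", valid.filter (fun p => pvContains? startersS (pvPid? p))),
   ("bench", valid.filter (fun p => !(pvContains? knownS (pvPid? p)))),
   ("taxi", valid.filter (fun p => pvContains? taxiS (pvPid? p))),
   ("reserve", valid.filter (fun p => pvContains? reserveS (pvPid? p)))]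

-- ===== PRECONDITION & SPEC =====
def Spec_organize_roster_by_position (players : List (List (String × String))) (starters_ids : List String) (taxi_ids : List String) (reserve_ids : List String) (out : List (String × List (List (String × String)))) : Prop := out = organize_roster_by_position_alt players starters_ids taxi_ids reserve_ids
instance (players : List (List (String × String))) (starters_ids : List String) (taxi_ids : List String) (reserve_ids : List String) (out : List (String × List (List (String × String)))) : Decidable (Spec_organize_roster_by_position players starters_ids taxi_ids reserve_ids out) := by unfold Spec_organize_roster_by_position; infer_instance

-- ===== CLAIM =====
def Claim_equal_organize_roster_by_position : Prop := ∀ (players : List (List (String × String))) (starters_ids : List String) (taxi_ids : List String) (reserve_ids : List String), Dom_organize_roster_by_position players starters_ids taxi_ids reserve_ids → Spec_organize_roster_by_position players starters_ids taxi_ids reserve_ids (organize_roster_by_position players starters_ids taxi_ids reserve_ids)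

-- ===== LEMMAS AND PROOFS =====

-- A's elif chain as four predicates on a player
def pvCatR (rids : List String) (p : List (String × String)) : Bool :=
  match pvPid? p with
  | none => false
  | some pid => decide (pid ∈ rids)
def pvCatT (tids rids : List String) (p : List (String × String)) : Bool :=
  match pvPid? p with
  | none => false
  | some pid => decide (pid ∉ rids ∧ pid ∈ tids)
def pvCatS (sids tids rids : List String) (p : List (String × String)) : Bool :=
  match pvPid? p with
  | none => false
  | some pid => decide (pid ∉ rids ∧ pid ∉ tids ∧ pid ∈ sids)
def pvCatB (sids tids rids : List String) (p : List (String × String)) : Bool :=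
  match pvPid? p with
  | none => false
  | some pid => decide (pid ∉ rids ∧ pid ∉ tids ∧ pid ∉ sids)

-- pvAStep written via pvPid? and the four predicates
lemma pvAStep_eq (sids tids rids : List String)
    (s b t r : List (List (String × String))) (p : List (String × String)) :
    pvAStep sids tids rids (s, b, t, r) p =
      (s ++ (if pvCatS sids tids rids p then [p] else []),
       b ++ (if pvCatB sids tids rids p then [p] else []),
       t ++ (if pvCatT tids rids p then [p] else []),
       r ++ (if pvCatR rids p then [p] else [])) := by
  unfold pvAStep pvCatS pvCatB pvCatT pvCatR pvPid?
  cases h : (PySem.Dict.mk p).get? "player_id" with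
  | none => simp
  | some pid =>
    simp only []
    by_cases h0 : pid = ""
    · simp [h0]
    · simp only [h0, if_false]
      by_cases hr : pid ∈ rids
      · simp [hr]
      · by_cases ht : pid ∈ tids
        · simp [hr, ht]
        · by_cases hs : pid ∈ sids
          · simp [hr, ht, hs]
          · simp [hr, ht, hs]

-- A's fold computes the four filtered lists
lemma foldA_eq (sids tids rids : List String) (players : List (List (String × String)))
    (s b t r : List (List (String × String))) :
    players.foldl (pvAStep sids tids rids) (s, b, t, r) =
      (s ++ players.filter (pvCatS sids tids rids),
       b ++ players.filter (pvCatB sids tids rids),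
       t ++ players.filter (pvCatT tids rids),
       r ++ players.filter (pvCatR rids)) := by
  induction players generalizing s b t r with
  | nil => simp
  | cons p rest ih =>
    simp only [List.foldl_cons, pvAStep_eq, ih, List.filter_cons]
    split_ifs <;> simp

-- Set.contains as a decidable membership test
lemma contains_eq (s : PySem.Set String) (x : String) :
    PySem.Set.contains s x = decide (x ∈ s) := by
  by_cases h : x ∈ s
  · simp [h]
  · simp only [h, decide_false]
    cases hc : PySem.Set.contains s x
    · rfl
    · exact absurd ((PySem.Set.contains_iff s x).mp hc) h

-- B's set-membership tests equal A's elif-chain predicates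
lemma containsR (rids : List String) (p : List (String × String)) :
    (pvContains? (PySem.Set.ofList rids) (pvPid? p) && (pvPid? p).isSome) = pvCatR rids p := by
  unfold pvContains? pvCatR
  cases pvPid? p with
  | none => rfl
  | some pid => simp [PySem.Set.mem_ofList]

lemma containsT (tids rids : List String) (p : List (String × String)) :
    (pvContains? (PySem.Set.diff (PySem.Set.ofList tids) (PySem.Set.ofList rids)) (pvPid? p) &&
      (pvPid? p).isSome) = pvCatT tids rids p := by
  unfold pvContains? pvCatT
  cases pvPid? p with
  | none => rfl
  | some pid =>
    simp only [contains_eq, PySem.Set.mem_diff, PySem.Set.mem_ofList, Option.isSome_some, Bool.and_true]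
    by_cases hr : pid ∈ rids <;> by_cases ht : pid ∈ tids <;> simp [hr, ht]

lemma containsS (sids tids rids : List String) (p : List (String × String)) :
    (pvContains? (PySem.Set.diff (PySem.Set.diff (PySem.Set.ofList sids) (PySem.Set.ofList rids))
        (PySem.Set.diff (PySem.Set.ofList tids) (PySem.Set.ofList rids))) (pvPid? p) &&
      (pvPid? p).isSome) = pvCatS sids tids rids p := by
  unfold pvContains? pvCatS
  cases pvPid? p with
  | none => rfl
  | some pid =>
    simp only [contains_eq, PySem.Set.mem_diff, PySem.Set.mem_ofList, Option.isSome_some, Bool.and_true]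
    by_cases hr : pid ∈ rids <;> by_cases ht : pid ∈ tids <;> by_cases hs : pid ∈ sids <;> simp [hr, ht, hs]

lemma containsK (sids tids rids : List String) (p : List (String × String)) :
    ((!pvContains? (PySem.Set.union (PySem.Set.union
          (PySem.Set.diff (PySem.Set.diff (PySem.Set.ofList sids) (PySem.Set.ofList rids))
            (PySem.Set.diff (PySem.Set.ofList tids) (PySem.Set.ofList rids)))
          (PySem.Set.diff (PySem.Set.ofList tids) (PySem.Set.ofList rids)))
          (PySem.Set.ofList rids)) (pvPid? p)) &&
      (pvPid? p).isSome) = pvCatB sids tids rids p := by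
  unfold pvContains? pvCatB
  cases pvPid? p with
  | none => rfl
  | some pid =>
    simp only [contains_eq, PySem.Set.mem_union, PySem.Set.mem_diff, PySem.Set.mem_ofList,
      Option.isSome_some, Bool.and_true]
    by_cases hr : pid ∈ rids <;> by_cases ht : pid ∈ tids <;> by_cases hs : pid ∈ sids <;> simp [hr, ht, hs]

-- ===== VERDICT =====
theorem organize_roster_by_position_spec : Claim_equal_organize_roster_by_position := by
  intro players starters_ids taxi_ids reserve_ids _
  unfold Spec_organize_roster_by_position organize_roster_by_position organize_roster_by_position_alt
  simp only [foldA_eq, List.nil_append, List.filter_filter, containsR, containsT, containsS, containsK]
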